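-- pv_equiv track=rewrite | github.com/m-crupi/noise_characterization | src/utils.py | list_to_index_alpha_beta
-- ===== SOURCE A (Python) =====
-- def list_to_index_alpha_beta (alpha,beta):
--     """returns the index corresponding to entries alpha and beta defined as list"""
--     n = len(alpha)
--     max_val = 4**n
--     if len(beta) != n:
--         raise("alpha and beta have mismatching dimensions.")
--     ind_a = 0
--     ind_b = 0
--     for i in range(n):
--         ind_a += 4**(n-i-1)*alpha[i]
--         ind_b += 4**(n-i-1)*beta[i]
--     return ind_a*max_val + ind_b
-- ===== SOURCE B (Python) =====
-- def list_to_index_alpha_beta(alpha, beta):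
--     """returns the index corresponding to entries alpha and beta defined as list"""
--     if len(beta) != len(alpha):
--         raise("alpha and beta have mismatching dimensions.")
--     idx = 0
--     for d in alpha + beta:
--         idx = idx * 4 + d
--     return idx
-- ===== Notes on version B (the rewrite author's own statement) =====
-- stated objective: faster
-- what changed: Replaces the two power-weighted index sums (recomputing 4**(n-i-1) from scratch each iteration) by a single Horner accumulator pass over the concatenated list alpha+beta.
import Mathlib
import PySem

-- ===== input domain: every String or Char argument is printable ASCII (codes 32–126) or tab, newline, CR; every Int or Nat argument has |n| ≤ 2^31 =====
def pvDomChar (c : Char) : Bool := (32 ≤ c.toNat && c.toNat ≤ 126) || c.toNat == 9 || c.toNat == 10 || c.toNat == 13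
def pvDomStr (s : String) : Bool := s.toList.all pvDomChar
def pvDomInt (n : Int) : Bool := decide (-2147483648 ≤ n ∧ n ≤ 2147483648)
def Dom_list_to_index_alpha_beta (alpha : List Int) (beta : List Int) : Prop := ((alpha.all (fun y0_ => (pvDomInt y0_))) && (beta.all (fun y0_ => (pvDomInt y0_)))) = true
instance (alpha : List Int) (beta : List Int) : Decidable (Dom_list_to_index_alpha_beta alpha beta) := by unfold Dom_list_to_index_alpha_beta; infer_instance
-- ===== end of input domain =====

-- B replaces A's two power-weighted index sums by a single Horner accumulator pass over alpha ++ beta (simpler).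


-- ===== PORT A =====
def list_to_index_alpha_beta (alpha : List Int) (beta : List Int) : Int :=
  let n : Int := alpha.length
  let max_val : Int := 4 ^ alpha.length
  -- the 'if len(beta) != n: raise' guard raises; Pre_ excludes those inputs
  let s := (PySem.List.pyRange 0 n 1).foldl
    (fun (p : Int × Int) i =>
      (p.1 + 4 ^ (n - i - 1).toNat * PySem.List.pyGetD alpha i 0,
       p.2 + 4 ^ (n - i - 1).toNat * PySem.List.pyGetD beta i 0)) (0, 0)
  s.1 * max_val + s.2

-- ===== PORT B =====
def list_to_index_alpha_beta_alt (alpha : List Int) (beta : List Int) : Int :=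
  -- the mismatch guard raises as in A; Pre_ excludes those inputs
  (alpha ++ beta).foldl (fun idx d => idx * 4 + d) 0

-- ===== PRECONDITION & SPEC =====
-- A (and B) raise TypeError when the two lists have different lengths; Pre_ excludes exactly those inputs.
def Pre_list_to_index_alpha_beta (alpha : List Int) (beta : List Int) : Prop := beta.length = alpha.length
instance (alpha : List Int) (beta : List Int) : Decidable (Pre_list_to_index_alpha_beta alpha beta) := by unfold Pre_list_to_index_alpha_beta; infer_instance
def pvWitness_list_to_index_alpha_beta : List Int × List Int := ([1, 2], [3, 0])

def Spec_list_to_index_alpha_beta (alpha : List Int) (beta : List Int) (out : Int) : Prop := out = list_to_index_alpha_beta_alt alpha beta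
instance (alpha : List Int) (beta : List Int) (out : Int) : Decidable (Spec_list_to_index_alpha_beta alpha beta out) := by unfold Spec_list_to_index_alpha_beta; infer_instance

-- ===== CLAIM (what is proved, stated in full; the proofs are below) =====
def Claim_equal_list_to_index_alpha_beta : Prop := ∀ (alpha : List Int) (beta : List Int), Dom_list_to_index_alpha_beta alpha beta → Pre_list_to_index_alpha_beta alpha beta → Spec_list_to_index_alpha_beta alpha beta (list_to_index_alpha_beta alpha beta)

-- ===== LEMMAS AND PROOFS =====

-- Horner step: folding B's accumulator over l from an arbitrary accumulator.
theorem horner_foldl (l : List Int) (acc : Int) :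
    l.foldl (fun idx d => idx * 4 + d) acc
      = acc * 4 ^ l.length + l.foldl (fun idx d => idx * 4 + d) 0 := by
  induction l generalizing acc with
  | nil => simp
  | cons d t ih =>
    simp only [List.foldl_cons, List.length_cons]
    rw [ih (acc * 4 + d), ih (0 * 4 + d)]
    ring

-- A's power-weighted index sum of a list equals B's Horner value of the same list.
theorem weighted_sum_eq_horner (l : List Int) :
    ((List.range l.length).map
        (fun k : Nat => 4 ^ (l.length - k - 1) * l.getD k 0)).sum
      = l.foldl (fun idx d => idx * 4 + d) 0 := by
  induction l with
  | nil => simp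
  | cons d t ih =>
    rw [List.length_cons, List.range_succ_eq_map, List.map_cons, List.map_map, List.sum_cons]
    have hmap : ((List.range t.length).map
          ((fun k : Nat => 4 ^ (t.length + 1 - k - 1) * (d :: t).getD k 0) ∘ Nat.succ))
        = (List.range t.length).map
          (fun k : Nat => 4 ^ (t.length - k - 1) * t.getD k 0) := by
      apply List.map_congr_left
      intro k _
      simp [Function.comp, List.getD]
    rw [hmap, ih, List.foldl_cons, horner_foldl t (0 * 4 + d)]
    simp [List.getD]
    ring

-- A's loop over range(n), read as a weighted sum with pyGetD, for a list of length n.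
theorem a_component (l : List Int) (n : Nat) (hn : l.length = n) :
    ((PySem.List.pyRange 0 (n : Int) 1).map
        (fun i => 4 ^ ((n : Int) - i - 1).toNat * PySem.List.pyGetD l i 0)).sum
      = l.foldl (fun idx d => idx * 4 + d) 0 := by
  subst hn
  rw [PySem.List.pyRange_one, List.map_map]
  have hm : ((List.range (((l.length : Int) - 0).toNat)).map
      ((fun i => 4 ^ ((l.length : Int) - i - 1).toNat * PySem.List.pyGetD l i 0) ∘ (fun k : Nat => (0 : Int) + k)))
      = (List.range l.length).map
        (fun k : Nat => 4 ^ (l.length - k - 1) * l.getD k 0) := by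
    have hl : ((l.length : Int) - 0).toNat = l.length := by omega
    rw [hl]
    apply List.map_congr_left
    intro k hk
    have hk' : k < l.length := List.mem_range.mp hk
    have h1 : ((l.length : Int) - ((0 : Int) + (k : Int)) - 1).toNat = l.length - k - 1 := by omega
    have h2 : PySem.List.pyGetD l ((0 : Int) + (k : Int)) 0 = l.getD k 0 := by
      rw [zero_add]; exact PySem.List.pyGetD_natCast l k 0
    simp only [Function.comp, h1, h2]
  rw [hm, weighted_sum_eq_horner]

-- ===== VERDICT (by name: the statement is the Claim_ definition above) =====
theorem list_to_index_alpha_beta_spec : Claim_equal_list_to_index_alpha_beta := by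
  intro alpha beta _ hpre
  unfold Spec_list_to_index_alpha_beta list_to_index_alpha_beta list_to_index_alpha_beta_alt
  simp only []
  rw [PySem.List.foldl_prod_mk
        (f := fun acc i => acc + 4 ^ (((alpha.length : Int)) - i - 1).toNat * PySem.List.pyGetD alpha i 0)
        (g := fun acc i => acc + 4 ^ (((alpha.length : Int)) - i - 1).toNat * PySem.List.pyGetD beta i 0)]
  rw [PySem.List.foldl_add, PySem.List.foldl_add]
  rw [a_component alpha alpha.length rfl, a_component beta alpha.length hpre]
  rw [List.foldl_append, horner_foldl beta (alpha.foldl (fun idx d => idx * 4 + d) 0)]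
  rw [hpre]
  ring
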